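-- pv_equiv track=rewrite | github.com/edgar971/cs-412-data-mining | week-1/apriori.py | create_term_set
-- ===== SOURCE A (Python) =====
-- def create_term_set(items) -> []:
--     term_set = []
--     for transaction in items:
--         for item in transaction:
--             if not item in term_set:
--                 term_set.append(item)
--
--     term_set.sort()
--
--     return list(term_set)
-- ===== SOURCE B (Python) =====
-- def create_term_set(items) -> []:
--     all_items = sorted(item for transaction in items for item in transaction)
--     result = []
--     for item in all_items:
--         if not result or result[-1] != item:
--             result.append(item)
--     return result
-- ===== Notes on version B (the rewrite author's own statement) =====
-- stated objective: faster
-- what changed: Replaces A's per-item linear membership scan over the growing unique list (then sort) by flatten + sort + one adjacency-dedup pass.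
import Mathlib
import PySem

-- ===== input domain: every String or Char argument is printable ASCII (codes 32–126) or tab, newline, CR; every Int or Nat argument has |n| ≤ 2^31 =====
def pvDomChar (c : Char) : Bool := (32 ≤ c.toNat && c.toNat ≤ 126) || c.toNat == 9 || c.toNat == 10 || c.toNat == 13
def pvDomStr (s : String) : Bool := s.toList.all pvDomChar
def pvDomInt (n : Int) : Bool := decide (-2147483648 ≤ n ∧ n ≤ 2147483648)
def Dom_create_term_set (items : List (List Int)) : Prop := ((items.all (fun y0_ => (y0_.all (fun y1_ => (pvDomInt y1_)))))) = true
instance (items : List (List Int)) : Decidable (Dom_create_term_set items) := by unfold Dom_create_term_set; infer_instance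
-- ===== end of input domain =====

-- B replaces A's per-item membership scan over the growing unique list by flatten + sort + one adjacency-dedup pass (faster on large inputs).

-- ===== PORT A =====
-- term_set accumulated by the two nested loops, then sorted in place and copied.
def create_term_set (items : List (List Int)) : List Int :=
  let ts := items.foldl
    (fun acc transaction =>
      transaction.foldl
        (fun acc item => if item ∈ acc then acc else acc ++ [item]) acc)
    []
  PySem.List.sorted ts (fun x => x) false

-- ===== PORT B =====
def create_term_set_alt (items : List (List Int)) : List Int :=
  let all_items := PySem.List.sorted (items.flatMap (fun transaction => transaction)) (fun x => x) false
  all_items.foldl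
    (fun result item =>
      if result = [] ∨ result.getLast? ≠ some item then result ++ [item] else result)
    []

-- ===== PRECONDITION & SPEC =====
def Spec_create_term_set (items : List (List Int)) (out : List Int) : Prop := out = create_term_set_alt items
instance (items : List (List Int)) (out : List Int) : Decidable (Spec_create_term_set items out) := by unfold Spec_create_term_set; infer_instance

-- ===== CLAIM (what is proved, stated in full; the proofs are below) =====
def Claim_equal_create_term_set : Prop := ∀ (items : List (List Int)), Dom_create_term_set items → Spec_create_term_set items (create_term_set items)

-- ===== LEMMAS AND PROOFS =====

-- adjacency dedup with explicit previous element (characterises B's fold)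
def dedupFrom (p : Int) : List Int → List Int
  | [] => []
  | x :: xs => if x = p then dedupFrom p xs else x :: dedupFrom x xs

-- B's fold, once the accumulator is nonempty, is acc ++ dedupFrom of the rest
theorem foldB_append (l : List Int) : ∀ (p : Int) (acc : List Int),
    l.foldl (fun result item =>
      if result = [] ∨ result.getLast? ≠ some item then result ++ [item] else result)
      (acc ++ [p]) = acc ++ [p] ++ dedupFrom p l := by
  induction l with
  | nil => intro p acc; simp [dedupFrom]
  | cons x xs ih =>
    intro p acc
    by_cases h : x = p
    · subst h
      simp [List.foldl, dedupFrom, ih]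
    · have : (acc ++ [p] = [] ∨ (acc ++ [p]).getLast? ≠ some x) := by
        right; simp; exact fun hc => h hc.symm
      simp only [List.foldl, dedupFrom, if_pos this, if_neg h]
      have := ih x (acc ++ [p])
      simpa using this

theorem foldB_eq_dedup (l : List Int) :
    l.foldl (fun result item =>
      if result = [] ∨ result.getLast? ≠ some item then result ++ [item] else result)
      [] = match l with
          | [] => []
          | x :: xs => x :: dedupFrom x xs := by
  cases l with
  | nil => rfl
  | cons x xs =>
    simp only [List.foldl]
    simpa using foldB_append xs x []

-- on a ≤-sorted tail, dedupFrom gives a strictly increasing list with the same members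
theorem dedupFrom_sorted (l : List Int) : ∀ (p : Int),
    (p :: l).Pairwise (· ≤ ·) →
    (p :: dedupFrom p l).Pairwise (· < ·) ∧ ∀ x, x ∈ p :: dedupFrom p l ↔ x ∈ p :: l := by
  induction l with
  | nil => intro p _; constructor <;> simp [dedupFrom]
  | cons x xs ih =>
    intro p hp
    have hpx : p ≤ x := (List.pairwise_cons.1 hp).1 x (by simp)
    have hxxs : (x :: xs).Pairwise (· ≤ ·) := (List.pairwise_cons.1 hp).2
    by_cases h : x = p
    · subst h
      obtain ⟨h1, h2⟩ := ih x hxxs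
      have hdd : dedupFrom x (x :: xs) = dedupFrom x xs := by simp [dedupFrom]
      rw [hdd]
      refine ⟨h1, ?_⟩
      intro y
      constructor
      · intro hy
        have := (h2 y).1 hy
        simp only [List.mem_cons] at this ⊢
        tauto
      · intro hy
        apply (h2 y).2
        simp only [List.mem_cons] at hy ⊢
        tauto
    · have hlt : p < x := lt_of_le_of_ne hpx (fun e => h e.symm)
      obtain ⟨h1, h2⟩ := ih x hxxs
      have hmemle : ∀ y ∈ x :: dedupFrom x xs, p < y := by
        intro y hy
        have : y ∈ x :: xs := (h2 y).1 hy
        rcases List.mem_cons.1 this with h' | h'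
        · simpa [h'] using hlt
        · have : x ≤ y := (List.pairwise_cons.1 hxxs).1 y h'
          omega
      constructor
      · simp only [dedupFrom, if_neg h]
        exact List.pairwise_cons.2 ⟨hmemle, h1⟩
      · intro y
        simp only [dedupFrom, if_neg h, List.mem_cons]
        have := h2 y
        simp only [List.mem_cons] at this
        tauto

-- A's inner loop: membership
theorem innerA_mem (t : List Int) : ∀ (acc : List Int) (x : Int),
    x ∈ t.foldl (fun acc item => if item ∈ acc then acc else acc ++ [item]) acc ↔ x ∈ acc ∨ x ∈ t := by
  induction t with
  | nil => intro acc x; simp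
  | cons a t ih =>
    intro acc x
    by_cases h : a ∈ acc
    · simp only [List.foldl, if_pos h, ih, List.mem_cons]
      constructor
      · rintro (h1 | h1) <;> tauto
      · rintro (h1 | h1 | h1) <;> try tauto
        subst h1; tauto
    · simp only [List.foldl, if_neg h, ih, List.mem_append, List.mem_cons]
      tauto

-- A's inner loop: nodup preserved
theorem innerA_nodup (t : List Int) : ∀ (acc : List Int), acc.Nodup →
    (t.foldl (fun acc item => if item ∈ acc then acc else acc ++ [item]) acc).Nodup := by
  induction t with
  | nil => intro acc h; simpa
  | cons a t ih =>
    intro acc h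
    by_cases hm : a ∈ acc
    · simpa [List.foldl, if_pos hm] using ih acc h
    · have : (acc ++ [a]).Nodup := by
        simp [List.nodup_append, h]
        exact fun b hb e => hm (e ▸ hb)
      simpa [List.foldl, if_neg hm] using ih (acc ++ [a]) this

-- A's outer loop: membership
theorem outerA_mem (items : List (List Int)) : ∀ (acc : List Int) (x : Int),
    x ∈ items.foldl (fun acc transaction =>
        transaction.foldl (fun acc item => if item ∈ acc then acc else acc ++ [item]) acc) acc
      ↔ x ∈ acc ∨ ∃ t ∈ items, x ∈ t := by
  induction items with
  | nil => intro acc x; simp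
  | cons t items ih =>
    intro acc x
    simp only [List.foldl, ih, innerA_mem, List.mem_cons]
    constructor
    · rintro ((h | h) | ⟨u, hu, hx⟩)
      · tauto
      · exact Or.inr ⟨t, Or.inl rfl, h⟩
      · exact Or.inr ⟨u, Or.inr hu, hx⟩
    · rintro (h | ⟨u, hu, hx⟩)
      · tauto
      · rcases hu with h' | h'
        · subst h'; tauto
        · exact Or.inr ⟨u, h', hx⟩

-- A's outer loop: nodup
theorem outerA_nodup (items : List (List Int)) : ∀ (acc : List Int), acc.Nodup →
    (items.foldl (fun acc transaction =>
        transaction.foldl (fun acc item => if item ∈ acc then acc else acc ++ [item]) acc) acc).Nodup := by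
  induction items with
  | nil => intro acc h; simpa
  | cons t items ih =>
    intro acc h
    exact ih _ (innerA_nodup t acc h)

-- ===== VERDICT (by name: the statement is the Claim_ definition above) =====
theorem create_term_set_spec : Claim_equal_create_term_set := by
  intro items _
  unfold Spec_create_term_set create_term_set create_term_set_alt
  simp only []
  set step := fun (acc : List Int) (item : Int) => if item ∈ acc then acc else acc ++ [item] with hstep
  set ts := items.foldl (fun acc transaction => transaction.foldl step acc) [] with hts
  set flat := items.flatMap (fun transaction => transaction) with hflat
  have hmem_ts : ∀ x, x ∈ ts ↔ x ∈ flat := by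
    intro x
    rw [hts, outerA_mem items [] x]
    simp only [List.not_mem_nil, false_or, hflat, List.mem_flatMap]
  have hnodup_ts : ts.Nodup := outerA_nodup items [] (by simp)
  rw [foldB_eq_dedup]
  rcases hsf : PySem.List.sorted flat (fun x => x) false with _ | ⟨m, t⟩
  · -- sorted flat = [] → flat = [] → ts = [] → sorted ts = []
    have hflat0 : flat = [] := (PySem.List.sorted_eq_nil_iff flat (fun x => x) false).1 hsf
    have hts0 : ts = [] := by
      apply List.eq_nil_iff_forall_not_mem.2
      intro x hx
      exact absurd ((hmem_ts x).1 hx) (by simp [hflat0])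
    rw [hts0]
    rfl
  · -- sorted flat = m :: t
    have hpair : (m :: t).Pairwise (· ≤ ·) := by
      have := PySem.List.sorted_pairwise flat (fun x => x)
      rw [hsf] at this
      simpa using this
    obtain ⟨hlt, hm⟩ := dedupFrom_sorted t m hpair
    apply PySem.List.sorted_eq_of_perm_of_pairwise_lt
    · -- perm: both nodup, same membership
      have hnodup_d : (m :: dedupFrom m t).Nodup := hlt.imp (fun h => ne_of_lt h)
      refine (List.perm_ext_iff_of_nodup hnodup_d hnodup_ts).2 ?_
      intro x
      rw [hm x, hmem_ts x]
      have := PySem.List.mem_sorted (xs := flat) (key := fun x => x) (rev := false) (x := x)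
      rw [hsf] at this
      exact this
    · simpa using hlt
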